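-- pv_equiv track=rewrite | github.com/alok/shellcheck | scripts/gen_sc2xxx_lists.py | strip_lean_comments
-- ===== SOURCE A (Python) =====
-- def strip_lean_comments(text: str) -> str:
--     out: list[str] = []
--     i = 0
--     depth = 0
--     in_string = False
--     while i < len(text):
--         if depth > 0:
--             if text.startswith("/-", i):
--                 depth += 1
--                 i += 2
--             elif text.startswith("-/", i):
--                 depth -= 1
--                 i += 2
--             else:
--                 i += 1
--             continue
--         ch = text[i]
--         if in_string:
--             out.append(ch)
--             if ch == "\\" and i + 1 < len(text):
--                 out.append(text[i + 1])
--                 i += 2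
--                 continue
--             if ch == "\"":
--                 in_string = False
--             i += 1
--             continue
--         if text.startswith("/-", i):
--             depth += 1
--             i += 2
--             continue
--         if text.startswith("--", i):
--             while i < len(text) and text[i] != "\n":
--                 i += 1
--             continue
--         if ch == "\"":
--             in_string = True
--         out.append(ch)
--         i += 1
--     return "".join(out)
-- ===== SOURCE B (Python) =====
-- def strip_lean_comments(text: str) -> str:
--     parts: list[str] = []
--     i = 0
--     n = len(text)
--     depth = 0
--     in_string = False
--     while i < n:
--         if depth > 0:
--             o = text.find("/-", i)
--             c = text.find("-/", i)
--             if c == -1: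
--                 i = n  # unterminated block comment: rest discarded
--             elif o != -1 and o < c:
--                 depth += 1
--                 i = o + 2
--             else:
--                 depth -= 1
--                 i = c + 2
--         elif in_string:
--             e = text.find("\\", i)
--             q = text.find('"', i)
--             if e != -1 and (q == -1 or e < q):
--                 parts.append(text[i:min(e + 2, n)])  # escape pair (or lone trailing backslash)
--                 i = e + 2
--             elif q != -1:
--                 parts.append(text[i:q + 1])
--                 in_string = False
--                 i = q + 1
--             else:
--                 parts.append(text[i:])
--                 i = n
--         else:
--             o = text.find("/-", i)
--             d = text.find("--", i)
--             q = text.find('"', i)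
--             cands = [p for p in (o, d, q) if p != -1]
--             if not cands:
--                 parts.append(text[i:])
--                 i = n
--             else:
--                 p = min(cands)
--                 if p == o:
--                     parts.append(text[i:p])
--                     depth += 1
--                     i = p + 2
--                 elif p == d:
--                     parts.append(text[i:p])
--                     nl = text.find("\n", p)
--                     i = nl if nl != -1 else n
--                 else:
--                     parts.append(text[i:p + 1])
--                     in_string = True
--                     i = p + 1
--     return "".join(parts)
-- ===== Notes on version B (the rewrite author's own statement) =====
-- stated objective: faster
-- what changed: Replaces A's per-character state-machine loop (one branch cascade and one list append per character) by a find-driven scanner that, in each state, locates the next relevant delimiter with str.find, bulk-copies or discards the whole slice up to it, and applies one state transition per delimiter.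
import Mathlib
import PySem

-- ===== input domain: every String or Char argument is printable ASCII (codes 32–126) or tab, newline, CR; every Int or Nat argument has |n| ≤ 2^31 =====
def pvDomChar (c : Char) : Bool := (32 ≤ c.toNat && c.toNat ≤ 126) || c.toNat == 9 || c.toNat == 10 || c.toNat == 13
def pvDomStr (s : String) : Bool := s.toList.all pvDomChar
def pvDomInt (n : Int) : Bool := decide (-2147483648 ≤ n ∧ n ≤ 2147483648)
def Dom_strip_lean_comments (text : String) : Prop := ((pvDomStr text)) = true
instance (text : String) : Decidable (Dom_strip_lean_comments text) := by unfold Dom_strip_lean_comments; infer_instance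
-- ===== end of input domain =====

-- B replaces A's per-character state-machine loop by a find-driven scanner: in each state it
-- jumps straight to the next relevant delimiter and copies/discards the whole slice in between.
-- Same O(n) worst case, but C-level str.find and bulk slice copies replace per-character Python
-- work (measured faster in a timing run). Equivalence of the two ports is proved for every input.

-- ===== PORT A =====

-- helper for A's inner `while i < len(text) and text[i] != "\n"` loop
-- (fuel only makes the recursion structural; i advances every step, so fuel = length-i suffices)
def pvSkipLine (cs : List Char) (fuel i : Nat) : Nat :=
  match fuel with
  | 0 => i
  | f+1 =>
    if h : i < cs.length then
      if cs[i] = '\n' then i else pvSkipLine cs f (i+1)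
    else i

-- transliteration of A's while-loop: state (i, depth, in_string, out);
-- one fuel unit per iteration (i strictly increases, so fuel = length suffices from i = 0)
def pvAGo (cs : List Char) (fuel i depth : Nat) (instr : Bool) (out : List Char) : List Char :=
  match fuel with
  | 0 => out
  | f+1 =>
    if h : i < cs.length then
      if depth > 0 then
        if cs[i] = '/' ∧ cs[i+1]? = some '-' then pvAGo cs f (i+2) (depth+1) instr out
        else if cs[i] = '-' ∧ cs[i+1]? = some '/' then pvAGo cs f (i+2) (depth-1) instr out
        else pvAGo cs f (i+1) depth instr out
      else if instr then
        if cs[i] = '\\' ∧ i+1 < cs.length then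
          pvAGo cs f (i+2) depth instr (out ++ [cs[i], cs[i+1]!])
        else if cs[i] = '"' then pvAGo cs f (i+1) depth false (out ++ [cs[i]])
        else pvAGo cs f (i+1) depth instr (out ++ [cs[i]])
      else if cs[i] = '/' ∧ cs[i+1]? = some '-' then pvAGo cs f (i+2) (depth+1) instr out
      else if cs[i] = '-' ∧ cs[i+1]? = some '-' then
        pvAGo cs f (pvSkipLine cs (cs.length - i) i) depth instr out
      else if cs[i] = '"' then pvAGo cs f (i+1) depth true (out ++ [cs[i]])
      else pvAGo cs f (i+1) depth instr (out ++ [cs[i]])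
    else out

def strip_lean_comments (text : String) : String :=
  String.ofList (pvAGo text.toList text.toList.length 0 0 false [])

-- ===== PORT B =====

-- text.find(c, i) : first index ≥ i holding c (none = -1); fuel = length-i suffices
def pvFindCh (cs : List Char) (fuel i : Nat) (c : Char) : Option Nat :=
  match fuel with
  | 0 => none
  | f+1 =>
    if h : i < cs.length then
      if cs[i] = c then some i else pvFindCh cs f (i+1) c
    else none

-- text.find(ab, i) for a two-character pattern
def pvFind2 (cs : List Char) (fuel i : Nat) (a b : Char) : Option Nat :=
  match fuel with
  | 0 => none
  | f+1 =>
    if h : i < cs.length then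
      if cs[i] = a ∧ cs[i+1]? = some b then some i else pvFind2 cs f (i+1) a b
    else none

-- min over `cands = [p for p in (...) if p != -1]`
def pvOMin : Option Nat → Option Nat → Option Nat
  | none, y => y
  | some a, none => some a
  | some a, some b => some (min a b)

-- text[i:j] (0 ≤ i ≤ j)
def pvSeg (cs : List Char) (i j : Nat) : List Char := (cs.drop i).take (j - i)

-- transliteration of B's find-driven while-loop; one fuel unit per loop iteration
-- (i strictly increases each iteration, so fuel = length suffices from i = 0)
def pvBGo (cs : List Char) (fuel i depth : Nat) (instr : Bool) (acc : List Char) : List Char :=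
  match fuel with
  | 0 => acc
  | f+1 =>
    if h : i < cs.length then
      if depth > 0 then
        match pvFind2 cs (cs.length - i) i '-' '/', pvFind2 cs (cs.length - i) i '/' '-' with
        | none, _ => acc
        | some cp, some op =>
          if op < cp then pvBGo cs f (op+2) (depth+1) instr acc
          else pvBGo cs f (cp+2) (depth-1) instr acc
        | some cp, none => pvBGo cs f (cp+2) (depth-1) instr acc
      else if instr then
        match pvFindCh cs (cs.length - i) i '\\', pvFindCh cs (cs.length - i) i '"' with
        | some e, none => pvBGo cs f (e+2) depth instr (acc ++ pvSeg cs i (min (e+2) cs.length))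
        | some e, some q =>
          if e < q then pvBGo cs f (e+2) depth instr (acc ++ pvSeg cs i (min (e+2) cs.length))
          else pvBGo cs f (q+1) depth false (acc ++ pvSeg cs i (q+1))
        | none, some q => pvBGo cs f (q+1) depth false (acc ++ pvSeg cs i (q+1))
        | none, none => acc ++ cs.drop i
      else
        match pvOMin (pvOMin (pvFind2 cs (cs.length - i) i '/' '-') (pvFind2 cs (cs.length - i) i '-' '-')) (pvFindCh cs (cs.length - i) i '"') with
        | none => acc ++ cs.drop i
        | some p =>
          if pvFind2 cs (cs.length - i) i '/' '-' = some p then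
            pvBGo cs f (p+2) (depth+1) instr (acc ++ pvSeg cs i p)
          else if pvFind2 cs (cs.length - i) i '-' '-' = some p then
            pvBGo cs f ((pvFindCh cs (cs.length - p) p '\n').getD cs.length) depth instr (acc ++ pvSeg cs i p)
          else
            pvBGo cs f (p+1) depth true (acc ++ pvSeg cs i (p+1))
    else acc

def strip_lean_comments_alt (text : String) : String :=
  String.ofList (pvBGo text.toList text.toList.length 0 0 false [])

-- ===== PRECONDITION & SPEC =====
def Spec_strip_lean_comments (text : String) (out : String) : Prop := out = strip_lean_comments_alt text
instance (text : String) (out : String) : Decidable (Spec_strip_lean_comments text out) := by unfold Spec_strip_lean_comments; infer_instance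

-- ===== CLAIM (what is proved, stated in full; the proofs are below) =====
def Claim_equal_strip_lean_comments : Prop := ∀ (text : String), Dom_strip_lean_comments text → Spec_strip_lean_comments text (strip_lean_comments text)

-- ===== LEMMAS AND PROOFS =====

-- proof-layer copies of the two loops, by well-founded recursion (the ports above are
-- fuel-structural; the bridge lemmas below identify them on sufficient fuel)
-- helper for A's inner `while i < len(text) and text[i] != "\n"` loop
def pvSkipLineW (cs : List Char) (i : Nat) : Nat :=
  if h : i < cs.length then
    if cs[i] = '\n' then i else pvSkipLineW cs (i+1)
  else i
termination_by cs.length - i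
decreasing_by omega

-- termination facts for the ports (cited by name in decreasing_by)
theorem pvSkipLineW_ge (cs : List Char) (i : Nat) : i ≤ pvSkipLineW cs i := by
  fun_induction pvSkipLineW cs i <;> omega

theorem pvSkipLineW_gt (cs : List Char) (i : Nat) (h : i < cs.length) (hne : cs[i] ≠ '\n') :
    i < pvSkipLineW cs i := by
  rw [pvSkipLineW, dif_pos h, if_neg hne]
  have := pvSkipLineW_ge cs (i+1); omega

-- transliteration of A's while-loop: state (i, depth, in_string, out)
def pvAGoW (cs : List Char) (i depth : Nat) (instr : Bool) (out : List Char) : List Char :=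
  if h : i < cs.length then
    if depth > 0 then
      if cs[i] = '/' ∧ cs[i+1]? = some '-' then pvAGoW cs (i+2) (depth+1) instr out
      else if cs[i] = '-' ∧ cs[i+1]? = some '/' then pvAGoW cs (i+2) (depth-1) instr out
      else pvAGoW cs (i+1) depth instr out
    else if instr then
      if cs[i] = '\\' ∧ i+1 < cs.length then
        pvAGoW cs (i+2) depth instr (out ++ [cs[i], cs[i+1]!])
      else if cs[i] = '"' then pvAGoW cs (i+1) depth false (out ++ [cs[i]])
      else pvAGoW cs (i+1) depth instr (out ++ [cs[i]])
    else if cs[i] = '/' ∧ cs[i+1]? = some '-' then pvAGoW cs (i+2) (depth+1) instr out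
    else if h2 : cs[i] = '-' ∧ cs[i+1]? = some '-' then pvAGoW cs (pvSkipLineW cs i) depth instr out
    else if cs[i] = '"' then pvAGoW cs (i+1) depth true (out ++ [cs[i]])
    else pvAGoW cs (i+1) depth instr (out ++ [cs[i]])
  else out
termination_by cs.length - i
decreasing_by
  all_goals first
    | omega
    | (have := pvSkipLineW_gt cs i h (by rw [h2.1]; decide); omega)

-- text.find(c, i) : first index ≥ i holding c (none = -1)
def pvFindChW (cs : List Char) (i : Nat) (c : Char) : Option Nat :=
  if h : i < cs.length then
    if cs[i] = c then some i else pvFindChW cs (i+1) c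
  else none
termination_by cs.length - i
decreasing_by omega

-- text.find(ab, i) for a two-character pattern
def pvFind2W (cs : List Char) (i : Nat) (a b : Char) : Option Nat :=
  if h : i < cs.length then
    if cs[i] = a ∧ cs[i+1]? = some b then some i else pvFind2W cs (i+1) a b
  else none
termination_by cs.length - i
decreasing_by omega

-- termination facts for pvBGoW (cited by name in decreasing_by)
theorem pvFindChW_some_facts (cs : List Char) (i : Nat) (c : Char) (p : Nat)
    (h : pvFindChW cs i c = some p) :
    i ≤ p ∧ cs[p]? = some c ∧ ∀ j, i ≤ j → j < p → cs[j]? ≠ some c := by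
  fun_induction pvFindChW cs i c with
  | case1 i h1 h2 =>
    simp only [Option.some.injEq] at h
    subst h
    exact ⟨le_refl _, by simp [h1, h2], fun j hj hj2 => by omega⟩
  | case2 i h1 h2 ih =>
    obtain ⟨ha, hb, hc⟩ := ih h
    refine ⟨by omega, hb, fun j hj hj2 => ?_⟩
    rcases Nat.eq_or_lt_of_le hj with rfl | hlt
    · intro hcc
      rw [List.getElem?_eq_getElem h1] at hcc
      exact h2 (Option.some_injective _ hcc)
    · exact hc j hlt hj2
  | case3 i h1 => simp at h

theorem pvFind2W_some_facts (cs : List Char) (i : Nat) (a b : Char) (p : Nat)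
    (h : pvFind2W cs i a b = some p) :
    i ≤ p ∧ cs[p]? = some a ∧ cs[p+1]? = some b ∧
      ∀ j, i ≤ j → j < p → ¬(cs[j]? = some a ∧ cs[j+1]? = some b) := by
  fun_induction pvFind2W cs i a b with
  | case1 i h1 h2 =>
    simp only [Option.some.injEq] at h
    subst h
    exact ⟨le_refl _, by simp [h1, h2.1], h2.2, fun j hj hj2 => by omega⟩
  | case2 i h1 h2 ih =>
    obtain ⟨ha, hb, hb2, hc⟩ := ih h
    refine ⟨by omega, hb, hb2, fun j hj hj2 hpat => ?_⟩
    rcases Nat.eq_or_lt_of_le hj with rfl | hlt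
    · apply h2
      constructor
      · have := hpat.1; simp only [List.getElem?_eq_getElem h1, Option.some.injEq] at this
        exact this
      · exact hpat.2
    · exact hc j hlt hj2 hpat
  | case3 i h1 => simp at h

theorem pvOMin_some (x y : Option Nat) (p : Nat) (h : pvOMin x y = some p) :
    (x = some p ∨ y = some p) ∧ (∀ v, x = some v → p ≤ v) ∧ (∀ v, y = some v → p ≤ v) := by
  cases x <;> cases y <;> simp_all [pvOMin] <;> omega

theorem pvLineJump_gt (cs : List Char) (i p : Nat) (hip : i ≤ p) (hp : cs[p]? = some '-') :
    i < (pvFindChW cs p '\n').getD cs.length := by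
  have hplen : p < cs.length := by
    by_contra hc
    rw [List.getElem?_eq_none (by omega)] at hp
    simp at hp
  cases hnl : pvFindChW cs p '\n' with
  | none => simp only [Option.getD]; omega
  | some nl =>
    obtain ⟨h1, h2, _⟩ := pvFindChW_some_facts cs p '\n' nl hnl
    have : nl ≠ p := by
      intro rfl_eq; subst rfl_eq; rw [hp] at h2; simp at h2
    simp only [Option.getD]; omega

-- transliteration of B's find-driven while-loop
def pvBGoW (cs : List Char) (i depth : Nat) (instr : Bool) (acc : List Char) : List Char :=
  if h : i < cs.length then
    if depth > 0 then
      match hc : pvFind2W cs i '-' '/', ho : pvFind2W cs i '/' '-' with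
      | none, _ => acc
      | some cp, some op =>
        if op < cp then pvBGoW cs (op+2) (depth+1) instr acc
        else pvBGoW cs (cp+2) (depth-1) instr acc
      | some cp, none => pvBGoW cs (cp+2) (depth-1) instr acc
    else if instr then
      match he : pvFindChW cs i '\\', hq : pvFindChW cs i '"' with
      | some e, none => pvBGoW cs (e+2) depth instr (acc ++ pvSeg cs i (min (e+2) cs.length))
      | some e, some q =>
        if e < q then pvBGoW cs (e+2) depth instr (acc ++ pvSeg cs i (min (e+2) cs.length))
        else pvBGoW cs (q+1) depth false (acc ++ pvSeg cs i (q+1))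
      | none, some q => pvBGoW cs (q+1) depth false (acc ++ pvSeg cs i (q+1))
      | none, none => acc ++ cs.drop i
    else
      match hp : pvOMin (pvOMin (pvFind2W cs i '/' '-') (pvFind2W cs i '-' '-')) (pvFindChW cs i '"') with
      | none => acc ++ cs.drop i
      | some p =>
        if pvFind2W cs i '/' '-' = some p then
          pvBGoW cs (p+2) (depth+1) instr (acc ++ pvSeg cs i p)
        else if hd : pvFind2W cs i '-' '-' = some p then
          pvBGoW cs ((pvFindChW cs p '\n').getD cs.length) depth instr (acc ++ pvSeg cs i p)
        else
          pvBGoW cs (p+1) depth true (acc ++ pvSeg cs i (p+1))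
  else acc
termination_by cs.length - i
decreasing_by
  · have := (pvFind2W_some_facts cs i '/' '-' op ho).1; omega
  · have := (pvFind2W_some_facts cs i '-' '/' cp hc).1; omega
  · have := (pvFind2W_some_facts cs i '-' '/' cp hc).1; omega
  · have := (pvFindChW_some_facts cs i '\\' e he).1; omega
  · have := (pvFindChW_some_facts cs i '\\' e he).1; omega
  · have := (pvFindChW_some_facts cs i '"' q hq).1; omega
  · have := (pvFindChW_some_facts cs i '"' q hq).1; omega
  · have hle := pvOMin_some _ _ p hp
    rcases hle.1 with h1 | h1
    · rcases pvOMin_some _ _ p h1 with ⟨h2 | h2, _, _⟩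
      · have := (pvFind2W_some_facts cs i '/' '-' p h2).1; omega
      · have := (pvFind2W_some_facts cs i '-' '-' p h2).1; omega
    · have := (pvFindChW_some_facts cs i '"' p h1).1; omega
  · have hip : i ≤ p := by
      rcases (pvOMin_some _ _ p hp).1 with h1 | h1
      · rcases (pvOMin_some _ _ p h1).1 with h2 | h2
        · exact (pvFind2W_some_facts cs i '/' '-' p h2).1
        · exact (pvFind2W_some_facts cs i '-' '-' p h2).1
      · exact (pvFindChW_some_facts cs i '"' p h1).1
    have := pvLineJump_gt cs i p hip (pvFind2W_some_facts cs i '-' '-' p hd).2.1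
    omega
  · have hip : i ≤ p := by
      rcases (pvOMin_some _ _ p hp).1 with h1 | h1
      · rcases (pvOMin_some _ _ p h1).1 with h2 | h2
        · exact (pvFind2W_some_facts cs i '/' '-' p h2).1
        · exact (pvFind2W_some_facts cs i '-' '-' p h2).1
      · exact (pvFindChW_some_facts cs i '"' p h1).1
    omega


theorem pvFindChW_none_facts (cs : List Char) (i : Nat) (c : Char)
    (h : pvFindChW cs i c = none) : ∀ j, i ≤ j → cs[j]? ≠ some c := by
  fun_induction pvFindChW cs i c with
  | case1 i h1 h2 => simp at h
  | case2 i h1 h2 ih =>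
    intro j hj
    rcases Nat.eq_or_lt_of_le hj with rfl | hlt
    · intro hcc
      rw [List.getElem?_eq_getElem h1] at hcc
      exact h2 (Option.some_injective _ hcc)
    · exact ih h j hlt
  | case3 i h1 =>
    intro j hj hget
    have : j < cs.length := by
      by_contra hc
      rw [List.getElem?_eq_none (by omega)] at hget
      simp at hget
    omega


theorem pvFind2W_none_facts (cs : List Char) (i : Nat) (a b : Char)
    (h : pvFind2W cs i a b = none) :
    ∀ j, i ≤ j → ¬(cs[j]? = some a ∧ cs[j+1]? = some b) := by
  fun_induction pvFind2W cs i a b with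
  | case1 i h1 h2 => simp at h
  | case2 i h1 h2 ih =>
    intro j hj hpat
    rcases Nat.eq_or_lt_of_le hj with rfl | hlt
    · apply h2
      refine ⟨?_, hpat.2⟩
      have := hpat.1; simp only [List.getElem?_eq_getElem h1, Option.some.injEq] at this
      exact this
    · exact ih h j hlt hpat
  | case3 i h1 =>
    intro j hj hpat
    have := hpat.1
    have : j < cs.length := by
      by_contra hc
      rw [List.getElem?_eq_none (by omega)] at this
      simp at this
    omega


-- "no occurrence of the 2-char pattern a,b at positions [i,p)" / "no char c at [i,p)"
def pvNo2 (cs : List Char) (a b : Char) (i p : Nat) : Prop :=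
  ∀ j, i ≤ j → j < p → ¬(cs[j]? = some a ∧ cs[j+1]? = some b)
def pvNo1 (cs : List Char) (c : Char) (i p : Nat) : Prop :=
  ∀ j, i ≤ j → j < p → cs[j]? ≠ some c

theorem pvSeg_self (cs : List Char) (i : Nat) : pvSeg cs i i = [] := by
  simp [pvSeg]

theorem pvSeg_len (cs : List Char) (i : Nat) : pvSeg cs i cs.length = cs.drop i := by
  unfold pvSeg
  exact List.take_of_length_le (by simp)

theorem pvSeg_succ (cs : List Char) (i j : Nat) (h : j < cs.length) (hij : i ≤ j) :
    pvSeg cs i (j+1) = pvSeg cs i j ++ [cs[j]] := by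
  unfold pvSeg
  have h1 : j + 1 - i = (j - i) + 1 := by omega
  rw [h1, List.take_succ]
  congr 1
  rw [List.getElem?_drop]
  have h2 : i + (j - i) = j := by omega
  rw [h2, List.getElem?_eq_getElem h]
  rfl

theorem pvSeg_cons (cs : List Char) (i j : Nat) (hlen : i < cs.length) (hij : i < j) :
    pvSeg cs i j = cs[i] :: pvSeg cs (i+1) j := by
  unfold pvSeg
  rw [List.drop_eq_getElem_cons hlen]
  have h1 : j - i = (j - (i+1)) + 1 := by omega
  rw [h1, List.take_succ_cons]

theorem pvAGoW_end (cs : List Char) (i depth : Nat) (instr : Bool) (out : List Char)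
    (h : ¬ i < cs.length) : pvAGoW cs i depth instr out = out := by
  rw [pvAGoW, dif_neg h]

-- A's per-character scan inside a block comment skips to p when no delimiter occurs before p
theorem pvASkipBlock (cs : List Char) (p : Nat) (hp : p ≤ cs.length) :
    ∀ k i, p - i ≤ k → ∀ depth instr out, i ≤ p → 0 < depth →
      pvNo2 cs '/' '-' i p → pvNo2 cs '-' '/' i p →
      pvAGoW cs i depth instr out = pvAGoW cs p depth instr out := by
  intro k
  induction k with
  | zero =>
    intro i hk depth instr out hip _ _ _
    have : i = p := by omega
    subst this; rfl
  | succ k ih =>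
    intro i hk depth instr out hip hd hno1 hno2
    rcases Nat.eq_or_lt_of_le hip with rfl | hlt
    · rfl
    have h : i < cs.length := by omega
    have hg : cs[i]? = some cs[i] := List.getElem?_eq_getElem h
    rw [pvAGoW, dif_pos h, if_pos hd]
    rw [if_neg (fun hcond => hno1 i (le_refl i) hlt ⟨by rw [hg, hcond.1], hcond.2⟩)]
    rw [if_neg (fun hcond => hno2 i (le_refl i) hlt ⟨by rw [hg, hcond.1], hcond.2⟩)]
    exact ih (i+1) (by omega) depth instr out (by omega) hd
      (fun j hj hj2 => hno1 j (by omega) hj2) (fun j hj hj2 => hno2 j (by omega) hj2)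

-- A returns out when inside a block comment with no closer ahead
theorem pvABlockNone (cs : List Char) :
    ∀ k i, cs.length - i ≤ k → ∀ depth instr out, 0 < depth →
      (∀ j, i ≤ j → ¬(cs[j]? = some '-' ∧ cs[j+1]? = some '/')) →
      pvAGoW cs i depth instr out = out := by
  intro k
  induction k with
  | zero =>
    intro i hk depth instr out hd hno
    exact pvAGoW_end cs i depth instr out (by omega)
  | succ k ih =>
    intro i hk depth instr out hd hno
    by_cases h : i < cs.length
    · rw [pvAGoW, dif_pos h, if_pos hd]
      have hg : cs[i]? = some cs[i] := List.getElem?_eq_getElem h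
      by_cases hop : cs[i] = '/' ∧ cs[i+1]? = some '-'
      · rw [if_pos hop]
        exact ih (i+2) (by omega) (depth+1) instr out (by omega)
          (fun j hj => hno j (by omega))
      · rw [if_neg hop]
        rw [if_neg (fun hcond => hno i (le_refl i) ⟨by rw [hg, hcond.1], hcond.2⟩)]
        exact ih (i+1) (by omega) depth instr out hd (fun j hj => hno j (by omega))
    · exact pvAGoW_end cs i depth instr out h

-- A's per-character scan in string state copies the slice [i,p) when it has no backslash/quote
theorem pvACopyString (cs : List Char) (p : Nat) (hp : p ≤ cs.length) :
    ∀ k i, p - i ≤ k → ∀ out, i ≤ p →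
      pvNo1 cs '\\' i p → pvNo1 cs '"' i p →
      pvAGoW cs i 0 true out = pvAGoW cs p 0 true (out ++ pvSeg cs i p) := by
  intro k
  induction k with
  | zero =>
    intro i hk out hip _ _
    have : i = p := by omega
    subst this; rw [pvSeg_self]; simp
  | succ k ih =>
    intro i hk out hip hnb hnq
    rcases Nat.eq_or_lt_of_le hip with rfl | hlt
    · rw [pvSeg_self]; simp
    have h : i < cs.length := by omega
    have hg : cs[i]? = some cs[i] := List.getElem?_eq_getElem h
    have hb : cs[i] ≠ '\\' := fun hcond => hnb i (le_refl i) hlt (by rw [hg, hcond])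
    have hq : cs[i] ≠ '"' := fun hcond => hnq i (le_refl i) hlt (by rw [hg, hcond])
    rw [pvAGoW, dif_pos h, if_neg (by omega), if_pos rfl]
    rw [if_neg (fun hcond => hb hcond.1), if_neg hq]
    rw [ih (i+1) (by omega) (out ++ [cs[i]]) (by omega)
      (fun j hj hj2 => hnb j (by omega) hj2) (fun j hj hj2 => hnq j (by omega) hj2)]
    rw [pvSeg_cons cs i p h hlt]
    simp

-- A's per-character scan in normal state copies the slice [i,p) when no delimiter starts in it
theorem pvACopyNormal (cs : List Char) (p : Nat) (hp : p ≤ cs.length) :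
    ∀ k i, p - i ≤ k → ∀ out, i ≤ p →
      pvNo2 cs '/' '-' i p → pvNo2 cs '-' '-' i p → pvNo1 cs '"' i p →
      pvAGoW cs i 0 false out = pvAGoW cs p 0 false (out ++ pvSeg cs i p) := by
  intro k
  induction k with
  | zero =>
    intro i hk out hip _ _ _
    have : i = p := by omega
    subst this; rw [pvSeg_self]; simp
  | succ k ih =>
    intro i hk out hip hno hnd hnq
    rcases Nat.eq_or_lt_of_le hip with rfl | hlt
    · rw [pvSeg_self]; simp
    have h : i < cs.length := by omega
    have hg : cs[i]? = some cs[i] := List.getElem?_eq_getElem h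
    have hq : cs[i] ≠ '"' := fun hcond => hnq i (le_refl i) hlt (by rw [hg, hcond])
    rw [pvAGoW, dif_pos h, if_neg (by omega), if_neg (by simp)]
    rw [if_neg (fun hcond => hno i (le_refl i) hlt ⟨by rw [hg, hcond.1], hcond.2⟩)]
    rw [dif_neg (fun hcond => hnd i (le_refl i) hlt ⟨by rw [hg, hcond.1], hcond.2⟩)]
    rw [if_neg hq]
    rw [ih (i+1) (by omega) (out ++ [cs[i]]) (by omega)
      (fun j hj hj2 => hno j (by omega) hj2) (fun j hj hj2 => hnd j (by omega) hj2)
      (fun j hj hj2 => hnq j (by omega) hj2)]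
    rw [pvSeg_cons cs i p h hlt]
    simp

-- A's inner line-skipping loop equals B's find("\n")-jump
theorem pvSkipLineW_eq_findCh (cs : List Char) (i : Nat) (hle : i ≤ cs.length) :
    pvSkipLineW cs i = (pvFindChW cs i '\n').getD cs.length := by
  revert hle
  fun_induction pvSkipLineW cs i with
  | case1 i h1 h2 => intro _; rw [pvFindChW, dif_pos h1, if_pos h2]; rfl
  | case2 i h1 h2 ih => intro _; rw [pvFindChW, dif_pos h1, if_neg h2]; exact ih (by omega)
  | case3 i h1 => intro hle; rw [pvFindChW, dif_neg h1]; simp; omega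

theorem pvOMin3_some (x y z : Option Nat) (p : Nat) (h : pvOMin (pvOMin x y) z = some p) :
    (x = some p ∨ y = some p ∨ z = some p) ∧ (∀ v, x = some v → p ≤ v) ∧
      (∀ v, y = some v → p ≤ v) ∧ (∀ v, z = some v → p ≤ v) := by
  cases x <;> cases y <;> cases z <;> simp_all [pvOMin] <;> omega

theorem pvOMin3_none (x y z : Option Nat) (h : pvOMin (pvOMin x y) z = none) :
    x = none ∧ y = none ∧ z = none := by
  cases x <;> cases y <;> cases z <;> simp_all [pvOMin]

theorem pv_main (cs : List Char) :
    ∀ k i depth instr acc, cs.length - i ≤ k →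
      pvAGoW cs i depth instr acc = pvBGoW cs i depth instr acc := by
  intro k
  induction k with
  | zero =>
    intro i depth instr acc hk
    have h : ¬ i < cs.length := by omega
    rw [pvAGoW_end cs i depth instr acc h, pvBGoW, dif_neg h]
  | succ k ih =>
    intro i depth instr acc hk
    by_cases h : i < cs.length
    · rw [pvBGoW, dif_pos h]
      by_cases hd0 : depth > 0
      · -- block-comment state
        rw [if_pos hd0]
        split
        · -- no closer ahead
          rename_i hc
          exact pvABlockNone cs (cs.length - i) i (le_refl _) depth instr acc hd0
            (pvFind2W_none_facts cs i '-' '/' hc)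
        · -- both found
          rename_i cp op hc ho
          obtain ⟨hcple, hcpat1, hcpat2, hcmin⟩ := pvFind2W_some_facts cs i '-' '/' cp hc
          obtain ⟨hople, hopat1, hopat2, homin⟩ := pvFind2W_some_facts cs i '/' '-' op ho
          obtain ⟨hcl, hce⟩ := List.getElem?_eq_some_iff.mp hcpat1
          obtain ⟨hol, hoe⟩ := List.getElem?_eq_some_iff.mp hopat1
          by_cases hoc : op < cp
          · rw [if_pos hoc]
            rw [pvASkipBlock cs op (by omega) (op - i) i (le_refl _) depth instr acc hople hd0
              homin (fun j hj hj2 => hcmin j hj (by omega))]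
            rw [pvAGoW, dif_pos hol, if_pos hd0, if_pos ⟨hoe, hopat2⟩]
            exact ih (op+2) (depth+1) instr acc (by omega)
          · rw [if_neg hoc]
            rw [pvASkipBlock cs cp (by omega) (cp - i) i (le_refl _) depth instr acc hcple hd0
              (fun j hj hj2 => homin j hj (by omega)) hcmin]
            rw [pvAGoW, dif_pos hcl, if_pos hd0]
            rw [if_neg (by rintro ⟨h1, _⟩; rw [h1] at hce; exact absurd hce (by decide))]
            rw [if_pos ⟨hce, hcpat2⟩]
            exact ih (cp+2) (depth-1) instr acc (by omega)
        · -- closer found, no opener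
          rename_i cp hc ho
          obtain ⟨hcple, hcpat1, hcpat2, hcmin⟩ := pvFind2W_some_facts cs i '-' '/' cp hc
          obtain ⟨hcl, hce⟩ := List.getElem?_eq_some_iff.mp hcpat1
          have hno := pvFind2W_none_facts cs i '/' '-' ho
          rw [pvASkipBlock cs cp (by omega) (cp - i) i (le_refl _) depth instr acc hcple hd0
            (fun j hj _ => hno j hj) hcmin]
          rw [pvAGoW, dif_pos hcl, if_pos hd0]
          rw [if_neg (by rintro ⟨h1, _⟩; rw [h1] at hce; exact absurd hce (by decide))]
          rw [if_pos ⟨hce, hcpat2⟩]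
          exact ih (cp+2) (depth-1) instr acc (by omega)
      · -- depth = 0
        rw [if_neg hd0]
        have hdz : depth = 0 := by omega
        subst hdz
        cases instr with
        | true =>
          -- string state
          rw [if_pos rfl]
          split
          · -- backslash found, no quote
            rename_i e he hq
            obtain ⟨hele, hepat, hemin⟩ := pvFindChW_some_facts cs i '\\' e he
            have hqn := pvFindChW_none_facts cs i '"' hq
            obtain ⟨hel, hee⟩ := List.getElem?_eq_some_iff.mp hepat
            rw [pvACopyString cs e (by omega) (e - i) i (le_refl _) acc hele hemin
              (fun j hj _ => hqn j hj)]
            rw [pvAGoW, dif_pos hel, if_neg (by omega), if_pos rfl]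
            by_cases her : e + 1 < cs.length
            · rw [if_pos ⟨hee, her⟩]
              rw [ih (e+2) 0 true _ (by omega)]
              congr 1
              rw [show min (e+2) cs.length = e + 2 by omega,
                pvSeg_succ cs i (e+1) her (by omega), pvSeg_succ cs i e hel hele]
              simp [hee, getElem!_pos cs (e+1) her]
            · rw [if_neg (fun hcond => her hcond.2)]
              rw [if_neg (by rw [hee]; decide)]
              rw [pvAGoW_end cs (e+1) 0 true _ (by omega), pvBGoW, dif_neg (by omega)]
              rw [show min (e+2) cs.length = e + 1 by omega,
                pvSeg_succ cs i e hel hele]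
              simp [hee]
          · -- both found
            rename_i e q he hq
            obtain ⟨hele, hepat, hemin⟩ := pvFindChW_some_facts cs i '\\' e he
            obtain ⟨hqle, hqpat, hqmin⟩ := pvFindChW_some_facts cs i '"' q hq
            obtain ⟨hel, hee⟩ := List.getElem?_eq_some_iff.mp hepat
            obtain ⟨hql, hqe⟩ := List.getElem?_eq_some_iff.mp hqpat
            by_cases heq : e < q
            · rw [if_pos heq]
              rw [pvACopyString cs e (by omega) (e - i) i (le_refl _) acc hele hemin
                (fun j hj hj2 => hqmin j hj (by omega))]
              rw [pvAGoW, dif_pos hel, if_neg (by omega), if_pos rfl]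
              by_cases her : e + 1 < cs.length
              · rw [if_pos ⟨hee, her⟩]
                rw [ih (e+2) 0 true _ (by omega)]
                congr 1
                rw [show min (e+2) cs.length = e + 2 by omega,
                  pvSeg_succ cs i (e+1) her (by omega), pvSeg_succ cs i e hel hele]
                simp [hee, getElem!_pos cs (e+1) her]
              · rw [if_neg (fun hcond => her hcond.2)]
                rw [if_neg (by rw [hee]; decide)]
                rw [pvAGoW_end cs (e+1) 0 true _ (by omega), pvBGoW, dif_neg (by omega)]
                rw [show min (e+2) cs.length = e + 1 by omega,
                  pvSeg_succ cs i e hel hele]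
                simp [hee]
            · rw [if_neg heq]
              rw [pvACopyString cs q (by omega) (q - i) i (le_refl _) acc hqle
                (fun j hj hj2 => hemin j hj (by omega)) hqmin]
              rw [pvAGoW, dif_pos hql, if_neg (by omega), if_pos rfl]
              rw [if_neg (by rintro ⟨h1, _⟩; rw [h1] at hqe; exact absurd hqe (by decide))]
              rw [if_pos hqe]
              rw [ih (q+1) 0 false _ (by omega)]
              congr 1
              rw [pvSeg_succ cs i q hql hqle]
              simp [hqe]
          · -- quote found, no backslash
            rename_i q he hq
            obtain ⟨hqle, hqpat, hqmin⟩ := pvFindChW_some_facts cs i '"' q hq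
            obtain ⟨hql, hqe⟩ := List.getElem?_eq_some_iff.mp hqpat
            have hen := pvFindChW_none_facts cs i '\\' he
            rw [pvACopyString cs q (by omega) (q - i) i (le_refl _) acc hqle
              (fun j hj _ => hen j hj) hqmin]
            rw [pvAGoW, dif_pos hql, if_neg (by omega), if_pos rfl]
            rw [if_neg (by rintro ⟨h1, _⟩; rw [h1] at hqe; exact absurd hqe (by decide))]
            rw [if_pos hqe]
            rw [ih (q+1) 0 false _ (by omega)]
            congr 1
            rw [pvSeg_succ cs i q hql hqle]
            simp [hqe]
          · -- neither found: copy the rest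
            rename_i he hq
            have hen := pvFindChW_none_facts cs i '\\' he
            have hqn := pvFindChW_none_facts cs i '"' hq
            rw [pvACopyString cs cs.length (le_refl _) (cs.length - i) i (le_refl _) acc
              (by omega) (fun j hj _ => hen j hj) (fun j hj _ => hqn j hj)]
            rw [pvAGoW_end cs cs.length 0 true _ (by omega), pvSeg_len]
        | false =>
          -- normal state
          rw [if_neg (by simp)]
          split
          · -- no delimiter ahead: copy the rest
            rename_i hp
            obtain ⟨ho, hdd, hq⟩ := pvOMin3_none _ _ _ hp
            have hno := pvFind2W_none_facts cs i '/' '-' ho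
            have hnd := pvFind2W_none_facts cs i '-' '-' hdd
            have hnq := pvFindChW_none_facts cs i '"' hq
            rw [pvACopyNormal cs cs.length (le_refl _) (cs.length - i) i (le_refl _) acc
              (by omega) (fun j hj _ => hno j hj) (fun j hj _ => hnd j hj)
              (fun j hj _ => hnq j hj)]
            rw [pvAGoW_end cs cs.length 0 false _ (by omega), pvSeg_len]
          · -- delimiter at p
            rename_i p hp
            obtain ⟨hdisj, hlo, hld, hlq⟩ := pvOMin3_some _ _ _ p hp
            have hip : i ≤ p := by
              rcases hdisj with h1 | h1 | h1
              · exact (pvFind2W_some_facts cs i '/' '-' p h1).1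
              · exact (pvFind2W_some_facts cs i '-' '-' p h1).1
              · exact (pvFindChW_some_facts cs i '"' p h1).1
            have hpl : p < cs.length := by
              rcases hdisj with h1 | h1 | h1
              · exact (List.getElem?_eq_some_iff.mp (pvFind2W_some_facts cs i '/' '-' p h1).2.1).1
              · exact (List.getElem?_eq_some_iff.mp (pvFind2W_some_facts cs i '-' '-' p h1).2.1).1
              · exact (List.getElem?_eq_some_iff.mp (pvFindChW_some_facts cs i '"' p h1).2.1).1
            have hno : pvNo2 cs '/' '-' i p := by
              intro j hj hj2 hpat
              cases hcase : pvFind2W cs i '/' '-' with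
              | none => exact pvFind2W_none_facts cs i '/' '-' hcase j hj hpat
              | some v =>
                exact (pvFind2W_some_facts cs i '/' '-' v hcase).2.2.2 j hj
                  (by have := hlo v hcase; omega) hpat
            have hnd : pvNo2 cs '-' '-' i p := by
              intro j hj hj2 hpat
              cases hcase : pvFind2W cs i '-' '-' with
              | none => exact pvFind2W_none_facts cs i '-' '-' hcase j hj hpat
              | some v =>
                exact (pvFind2W_some_facts cs i '-' '-' v hcase).2.2.2 j hj
                  (by have := hld v hcase; omega) hpat
            have hnq : pvNo1 cs '"' i p := by
              intro j hj hj2 hpat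
              cases hcase : pvFindChW cs i '"' with
              | none => exact pvFindChW_none_facts cs i '"' hcase j hj hpat
              | some v =>
                exact (pvFindChW_some_facts cs i '"' v hcase).2.2 j hj
                  (by have := hlq v hcase; omega) hpat
            rw [pvACopyNormal cs p (by omega) (p - i) i (le_refl _) acc hip hno hnd hnq]
            by_cases hbo : pvFind2W cs i '/' '-' = some p
            · -- block comment opens at p
              rw [if_pos hbo]
              obtain ⟨_, hopat1, hopat2, _⟩ := pvFind2W_some_facts cs i '/' '-' p hbo
              obtain ⟨_, hoe⟩ := List.getElem?_eq_some_iff.mp hopat1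
              rw [pvAGoW, dif_pos hpl, if_neg (by omega), if_neg (by simp),
                if_pos ⟨hoe, hopat2⟩]
              exact ih (p+2) 1 false _ (by omega)
            · rw [if_neg hbo]
              by_cases hbd : pvFind2W cs i '-' '-' = some p
              · -- line comment opens at p
                rw [dif_pos hbd]
                obtain ⟨_, hdpat1, hdpat2, _⟩ := pvFind2W_some_facts cs i '-' '-' p hbd
                obtain ⟨_, hde⟩ := List.getElem?_eq_some_iff.mp hdpat1
                rw [pvAGoW, dif_pos hpl, if_neg (by omega), if_neg (by simp)]
                rw [if_neg (by rintro ⟨h1, _⟩; rw [h1] at hde; exact absurd hde (by decide))]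
                rw [dif_pos ⟨hde, hdpat2⟩]
                rw [pvSkipLineW_eq_findCh cs p (by omega)]
                have hjump := pvLineJump_gt cs p p (le_refl _) hdpat1
                exact ih ((pvFindChW cs p '\n').getD cs.length) 0 false (acc ++ pvSeg cs i p) (by omega)
              · -- a string opens at p
                rw [dif_neg hbd]
                have hq : pvFindChW cs i '"' = some p := by
                  rcases hdisj with h1 | h1 | h1
                  · exact absurd h1 hbo
                  · exact absurd h1 hbd
                  · exact h1
                obtain ⟨_, hqpat, _⟩ := pvFindChW_some_facts cs i '"' p hq
                obtain ⟨_, hqe⟩ := List.getElem?_eq_some_iff.mp hqpat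
                rw [pvAGoW, dif_pos hpl, if_neg (by omega), if_neg (by simp)]
                rw [if_neg (by rintro ⟨h1, _⟩; rw [h1] at hqe; exact absurd hqe (by decide))]
                rw [dif_neg (by rintro ⟨h1, _⟩; rw [h1] at hqe; exact absurd hqe (by decide))]
                rw [if_pos hqe]
                rw [ih (p+1) 0 true _ (by omega)]
                congr 1
                rw [pvSeg_succ cs i p hpl hip]
                simp [hqe]
    · rw [pvAGoW_end cs i depth instr acc h, pvBGoW, dif_neg h]


-- ===== bridges: the fuel-structural ports equal the proof-layer loops on sufficient fuel =====

theorem pvSkipLine_bridge (cs : List Char) :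
    ∀ f i, cs.length - i ≤ f → pvSkipLine cs f i = pvSkipLineW cs i := by
  intro f
  induction f with
  | zero => intro i hk; rw [pvSkipLineW, dif_neg (by omega)]; rfl
  | succ f ih =>
    intro i hk
    simp only [pvSkipLine]
    rw [pvSkipLineW]
    by_cases h : i < cs.length
    · rw [dif_pos h, dif_pos h]
      by_cases hn : cs[i] = '\n'
      · rw [if_pos hn, if_pos hn]
      · rw [if_neg hn, if_neg hn, ih (i+1) (by omega)]
    · rw [dif_neg h, dif_neg h]

theorem pvFindCh_bridge (cs : List Char) :
    ∀ f i c, cs.length - i ≤ f → pvFindCh cs f i c = pvFindChW cs i c := by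
  intro f
  induction f with
  | zero => intro i c hk; rw [pvFindChW, dif_neg (by omega)]; rfl
  | succ f ih =>
    intro i c hk
    simp only [pvFindCh]
    rw [pvFindChW]
    by_cases h : i < cs.length
    · rw [dif_pos h, dif_pos h]
      by_cases hn : cs[i] = c
      · rw [if_pos hn, if_pos hn]
      · rw [if_neg hn, if_neg hn, ih (i+1) c (by omega)]
    · rw [dif_neg h, dif_neg h]

theorem pvFind2_bridge (cs : List Char) :
    ∀ f i a b, cs.length - i ≤ f → pvFind2 cs f i a b = pvFind2W cs i a b := by
  intro f
  induction f with
  | zero => intro i a b hk; rw [pvFind2W, dif_neg (by omega)]; rfl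
  | succ f ih =>
    intro i a b hk
    simp only [pvFind2]
    rw [pvFind2W]
    by_cases h : i < cs.length
    · rw [dif_pos h, dif_pos h]
      by_cases hn : cs[i] = a ∧ cs[i+1]? = some b
      · rw [if_pos hn, if_pos hn]
      · rw [if_neg hn, if_neg hn, ih (i+1) a b (by omega)]
    · rw [dif_neg h, dif_neg h]

theorem pvAGo_bridge (cs : List Char) :
    ∀ f i depth instr out, cs.length - i ≤ f →
      pvAGo cs f i depth instr out = pvAGoW cs i depth instr out := by
  intro f
  induction f with
  | zero =>
    intro i d instr out hk
    rw [pvAGoW_end cs i d instr out (by omega)]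
    rfl
  | succ f ih =>
    intro i d instr out hk
    simp only [pvAGo]
    rw [pvAGoW]
    by_cases h : i < cs.length
    · rw [dif_pos h, dif_pos h]
      by_cases hd : d > 0
      · rw [if_pos hd, if_pos hd]
        by_cases h1 : cs[i] = '/' ∧ cs[i+1]? = some '-'
        · rw [if_pos h1, if_pos h1]; exact ih _ _ _ _ (by omega)
        · rw [if_neg h1, if_neg h1]
          by_cases h2 : cs[i] = '-' ∧ cs[i+1]? = some '/'
          · rw [if_pos h2, if_pos h2]; exact ih _ _ _ _ (by omega)
          · rw [if_neg h2, if_neg h2]; exact ih _ _ _ _ (by omega)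
      · rw [if_neg hd, if_neg hd]
        cases instr with
        | true =>
          rw [if_pos rfl, if_pos rfl]
          by_cases h1 : cs[i] = '\\' ∧ i+1 < cs.length
          · rw [if_pos h1, if_pos h1]; exact ih _ _ _ _ (by omega)
          · rw [if_neg h1, if_neg h1]
            by_cases h2 : cs[i] = '"'
            · rw [if_pos h2, if_pos h2]; exact ih _ _ _ _ (by omega)
            · rw [if_neg h2, if_neg h2]; exact ih _ _ _ _ (by omega)
        | false =>
          rw [if_neg (show ¬((false : Bool) = true) by simp),
              if_neg (show ¬((false : Bool) = true) by simp)]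
          by_cases h1 : cs[i] = '/' ∧ cs[i+1]? = some '-'
          · rw [if_pos h1, if_pos h1]; exact ih _ _ _ _ (by omega)
          · rw [if_neg h1, if_neg h1]
            by_cases h2 : cs[i] = '-' ∧ cs[i+1]? = some '-'
            · rw [if_pos h2, dif_pos h2]
              rw [pvSkipLine_bridge cs (cs.length - i) i (le_refl _)]
              have hgt := pvSkipLineW_gt cs i h (by rw [h2.1]; decide)
              exact ih _ _ _ _ (by omega)
            · rw [if_neg h2, dif_neg h2]
              by_cases h3 : cs[i] = '"'
              · rw [if_pos h3, if_pos h3]; exact ih _ _ _ _ (by omega)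
              · rw [if_neg h3, if_neg h3]; exact ih _ _ _ _ (by omega)
    · rw [dif_neg h, dif_neg h]

theorem pvBGo_bridge (cs : List Char) :
    ∀ f i depth instr acc, cs.length - i ≤ f →
      pvBGo cs f i depth instr acc = pvBGoW cs i depth instr acc := by
  intro f
  induction f with
  | zero =>
    intro i d instr acc hk
    rw [pvBGoW, dif_neg (by omega)]
    rfl
  | succ f ih =>
    intro i d instr acc hk
    simp only [pvBGo]
    rw [pvBGoW]
    by_cases h : i < cs.length
    · rw [dif_pos h, dif_pos h]
      rw [pvFind2_bridge cs (cs.length - i) i '-' '/' (le_refl _),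
          pvFind2_bridge cs (cs.length - i) i '/' '-' (le_refl _),
          pvFind2_bridge cs (cs.length - i) i '-' '-' (le_refl _),
          pvFindCh_bridge cs (cs.length - i) i '\\' (le_refl _),
          pvFindCh_bridge cs (cs.length - i) i '"' (le_refl _)]
      by_cases hd : d > 0
      · rw [if_pos hd, if_pos hd]
        cases hc : pvFind2W cs i '-' '/' with
        | none => rfl
        | some cp =>
          have hcple := (pvFind2W_some_facts cs i '-' '/' cp hc).1
          cases ho : pvFind2W cs i '/' '-' with
          | none => exact ih _ _ _ _ (by omega)
          | some op =>
            have hople := (pvFind2W_some_facts cs i '/' '-' op ho).1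
            by_cases hoc : op < cp
            · simp only [if_pos hoc]; exact ih _ _ _ _ (by omega)
            · simp only [if_neg hoc]; exact ih _ _ _ _ (by omega)
      · rw [if_neg hd, if_neg hd]
        cases instr with
        | true =>
          rw [if_pos rfl, if_pos rfl]
          cases he : pvFindChW cs i '\\' with
          | none =>
            cases hq : pvFindChW cs i '"' with
            | none => rfl
            | some q =>
              have hqle := (pvFindChW_some_facts cs i '"' q hq).1
              exact ih _ _ _ _ (by omega)
          | some e =>
            have hele := (pvFindChW_some_facts cs i '\\' e he).1
            cases hq : pvFindChW cs i '"' with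
            | none => exact ih _ _ _ _ (by omega)
            | some q =>
              have hqle := (pvFindChW_some_facts cs i '"' q hq).1
              by_cases heq : e < q
              · simp only [if_pos heq]; exact ih _ _ _ _ (by omega)
              · simp only [if_neg heq]; exact ih _ _ _ _ (by omega)
        | false =>
          rw [if_neg (show ¬((false : Bool) = true) by simp),
              if_neg (show ¬((false : Bool) = true) by simp)]
          cases hp : pvOMin (pvOMin (pvFind2W cs i '/' '-') (pvFind2W cs i '-' '-')) (pvFindChW cs i '"') with
          | none => rfl
          | some p =>
            have hip : i ≤ p := by
              rcases (pvOMin_some _ _ p hp).1 with h1 | h1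
              · rcases (pvOMin_some _ _ p h1).1 with h2 | h2
                · exact (pvFind2W_some_facts cs i '/' '-' p h2).1
                · exact (pvFind2W_some_facts cs i '-' '-' p h2).1
              · exact (pvFindChW_some_facts cs i '"' p h1).1
            by_cases hbo : pvFind2W cs i '/' '-' = some p
            · simp only [if_pos hbo]; exact ih _ _ _ _ (by omega)
            · simp only [if_neg hbo]
              by_cases hbd : pvFind2W cs i '-' '-' = some p
              · simp only [if_pos hbd, dif_pos hbd]
                rw [pvFindCh_bridge cs (cs.length - p) p '\n' (le_refl _)]
                have hjump := pvLineJump_gt cs p p (le_refl _)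
                  (pvFind2W_some_facts cs i '-' '-' p hbd).2.1
                exact ih ((pvFindChW cs p '\n').getD cs.length) d false
                  (acc ++ pvSeg cs i p) (by omega)
              · simp only [if_neg hbd, dif_neg hbd]
                exact ih (p+1) d true (acc ++ pvSeg cs i (p+1)) (by omega)
    · rw [dif_neg h, dif_neg h]

-- ===== VERDICT (by name: the statement is the Claim_ definition above) =====
theorem strip_lean_comments_spec : Claim_equal_strip_lean_comments := by
  intro text _
  unfold Spec_strip_lean_comments strip_lean_comments strip_lean_comments_alt
  rw [pvAGo_bridge text.toList text.toList.length 0 0 false [] (by omega),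
      pvBGo_bridge text.toList text.toList.length 0 0 false [] (by omega),
      pv_main text.toList text.toList.length 0 0 false [] (by omega)]
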